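-- pv_equiv track=rewrite | github.com/cesar-douady/open-lmake | _lib/fmt_rule.src.py | static_fstring
-- ===== SOURCE A (Python) =====
-- def static_fstring(s) :
-- 	'suppress double { and } assuming no variable part'
-- 	prev_c = '*'
-- 	res    = ''
-- 	for c in s :
-- 		if prev_c in '{}' :
-- 			assert c==prev_c
-- 			prev_c = '*'
-- 			continue
-- 		prev_c  = c
-- 		res    += c
-- 	assert prev_c not in '{}'
-- 	return res
-- ===== SOURCE B (Python) =====
-- def static_fstring(s) :
-- 	'suppress double { and } assuming no variable part'
-- 	res = []
-- 	i   = 0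
-- 	n   = len(s)
-- 	while i<n :
-- 		c = s[i]
-- 		if c in '{}' :
-- 			assert i+1<n and s[i+1]==c
-- 			res.append(c)
-- 			i += 2
-- 		else :
-- 			res.append(c)
-- 			i += 1
-- 	return ''.join(res)
-- ===== Notes on version B (the rewrite author's own statement) =====
-- stated objective: alternative
-- what changed: B replaces A's previous-character state machine (buffer prev_c, skip the second brace on the next iteration, trailing assert) with an index loop that consumes each doubled brace in one step via lookahead and advances by 2.
import Mathlib
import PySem

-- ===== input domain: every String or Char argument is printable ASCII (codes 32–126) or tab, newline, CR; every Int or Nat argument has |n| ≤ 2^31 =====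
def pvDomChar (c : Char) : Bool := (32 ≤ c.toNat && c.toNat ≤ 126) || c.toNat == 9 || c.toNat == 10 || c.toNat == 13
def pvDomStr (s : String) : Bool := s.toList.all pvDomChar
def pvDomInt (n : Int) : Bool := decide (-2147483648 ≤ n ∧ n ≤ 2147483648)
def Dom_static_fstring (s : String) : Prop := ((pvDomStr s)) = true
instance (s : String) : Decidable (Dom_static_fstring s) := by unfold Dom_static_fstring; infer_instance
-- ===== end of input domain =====

-- B changes the decomposition: an index/lookahead loop consuming each doubled brace in
-- one step, instead of A's previous-character state machine; same single pass, same cost.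

-- ===== PORT A =====
-- A's loop: state (prev_c, res); when prev_c is a brace the current char is skipped
-- (the assert c == prev_c holds on every input admitted by Pre_) and prev_c resets.
def pvALoop : List Char → Char → List Char → List Char
  | [], _, res => res
  | c :: rest, prev, res =>
    if prev = '{' ∨ prev = '}' then pvALoop rest '*' res
    else pvALoop rest c (res ++ [c])

def static_fstring (s : String) : String := String.ofList (pvALoop s.toList '*' [])

-- ===== PORT B =====
-- B's loop: look at the current char; a brace consumes two characters (the lookahead
-- assert i+1 < n ∧ s[i+1] = c holds on every input admitted by Pre_), else one.
def pvBLoop : List Char → List Char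
  | [] => []
  | c :: rest =>
    if c = '{' ∨ c = '}' then
      match rest with
      | _ :: rest' => c :: pvBLoop rest'
      | [] => [c]
    else c :: pvBLoop rest

def static_fstring_alt (s : String) : String := String.ofList (pvBLoop s.toList)

-- ===== PRECONDITION & SPEC =====
def pvIsBrace (c : Char) : Bool := c == '{' || c == '}'

-- every maximal run of a brace character has even length: position i starting a run of
-- '{' or '}' heads an even-length block of that character
def pvRunsEven (l : List Char) : Prop :=
  ∀ i : Nat, i < l.length → pvIsBrace (l.getD i ' ') = true →
    (i = 0 ∨ l.getD (i-1) ' ' ≠ l.getD i ' ') →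
    ((l.drop i).takeWhile (fun d => d == l.getD i ' ')).length % 2 = 0

-- Pre_ excludes exactly the inputs on which A (and B) raise AssertionError: braces must
-- come in adjacent identical pairs, i.e. every maximal brace run has even length.
def Pre_static_fstring (s : String) : Prop := pvRunsEven s.toList
instance (s : String) : Decidable (Pre_static_fstring s) := by unfold Pre_static_fstring pvRunsEven; infer_instance

def pvWitness_static_fstring : String := "a{{b}}c"

def Spec_static_fstring (s : String) (out : String) : Prop := out = static_fstring_alt s
instance (s : String) (out : String) : Decidable (Spec_static_fstring s out) := by unfold Spec_static_fstring; infer_instance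

-- ===== CLAIM (what is proved, stated in full; the proofs are below) =====
def Claim_equal_static_fstring : Prop := ∀ (s : String), Dom_static_fstring s → Pre_static_fstring s → Spec_static_fstring s (static_fstring s)

-- ===== LEMMAS AND PROOFS =====
lemma pv_rp_single (c : Char) (hc : pvIsBrace c = true) (h : pvRunsEven [c]) : False := by
  have := h 0 (by simp) (by simpa using hc) (Or.inl rfl)
  simp [List.takeWhile] at this

lemma pv_rp_head (c d : Char) (l : List Char) (hc : pvIsBrace c = true)
    (h : pvRunsEven (c :: d :: l)) : d = c := by
  by_contra hne
  have hdc : (d == c) = false := by simpa using hne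
  have := h 0 (by simp) (by simpa using hc) (Or.inl rfl)
  simp [List.takeWhile, hdc] at this

lemma pv_rp_tail2 (c : Char) (l : List Char) (h : pvRunsEven (c :: c :: l)) : pvRunsEven l := by
  intro j hj hbr hstart
  match j, hstart with
  | 0, _ =>
    by_cases h0 : l.getD 0 ' ' = c
    · have := h 0 (by simp) (by simp only [List.getD_cons_zero]; rw [← h0]; exact hbr) (Or.inl rfl)
      simp only [List.drop_zero, List.getD_cons_zero, List.takeWhile_cons, beq_self_eq_true,
        if_true, List.length_cons] at this
      simp only [List.drop_zero, h0]
      omega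
    · have := h 2 (by simpa using hj) (by simpa using hbr)
        (Or.inr (by simpa using fun he => h0 he.symm))
      simpa using this
  | (k+1), hstart =>
    have hst : l.getD k ' ' ≠ l.getD (k+1) ' ' := by
      rcases hstart with h1 | h2
      · omega
      · simpa using h2
    have := h (k+3) (by simpa using hj) (by simpa using hbr)
      (Or.inr (by simpa using hst))
    simpa using this

lemma pv_rp_tail (c : Char) (l : List Char) (hc : pvIsBrace c = false)
    (h : pvRunsEven (c :: l)) : pvRunsEven l := by
  intro j hj hbr hstart
  have hst : (c :: l).getD j ' ' ≠ l.getD j ' ' := by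
    match j, hstart with
    | 0, _ =>
      simp only [List.getD_cons_zero]
      intro he
      rw [he] at hc; rw [hbr] at hc; exact absurd hc (by simp)
    | (k+1), hstart =>
      rcases hstart with h1 | h2
      · omega
      · simpa using h2
  have := h (j+1) (by simpa using hj) (by simpa using hbr) (Or.inr (by simpa using hst))
  simpa using this

lemma pvALoop_prev (l : List Char) (prev : Char) (res : List Char)
    (h : ¬ (prev = '{' ∨ prev = '}')) : pvALoop l prev res = pvALoop l '*' res := by
  cases l <;> simp [pvALoop, h]

lemma pvALoop_key : ∀ (l : List Char), pvRunsEven l → ∀ (res : List Char),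
    pvALoop l '*' res = res ++ pvBLoop l := by
  intro l
  induction l using pvBLoop.induct with
  | case1 => intro _ res; simp [pvALoop, pvBLoop]
  | case2 c hbr d rest' ih =>
    intro hrp res
    have hc : pvIsBrace c = true := by simp only [pvIsBrace]; rcases hbr with h | h <;> simp [h]
    have hdc : d = c := pv_rp_head c d rest' hc hrp
    subst hdc
    have hrp' := pv_rp_tail2 d rest' hrp
    have hstar : ¬ ('*' = '{' ∨ '*' = '}') := by decide
    simp only [pvALoop, if_neg hstar, if_pos hbr, pvBLoop, ih hrp' (res ++ [d])]
    simp
  | case3 c hbr =>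
    intro hrp res
    have hc : pvIsBrace c = true := by simp only [pvIsBrace]; rcases hbr with h | h <;> simp [h]
    exact absurd (pv_rp_single c hc hrp) (by simp)
  | case4 c rest hbr ih =>
    intro hrp res
    have hc : pvIsBrace c = false := by
      simp only [pvIsBrace]
      push Not at hbr
      simp [hbr.1, hbr.2]
    have hrp' := pv_rp_tail c rest hc hrp
    have hstar : ¬ ('*' = '{' ∨ '*' = '}') := by decide
    rw [show pvBLoop (c :: rest) = c :: pvBLoop rest from by
      cases rest <;> simp [pvBLoop, hbr]]
    simp only [pvALoop, if_neg hstar]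
    rw [pvALoop_prev rest c (res ++ [c]) hbr, ih hrp' (res ++ [c])]
    simp

-- ===== VERDICT (by name: the statement is the Claim_ definition above) =====
theorem static_fstring_spec : Claim_equal_static_fstring := by
  intro s _ hpre
  unfold Spec_static_fstring static_fstring static_fstring_alt
  rw [pvALoop_key s.toList hpre []]
  simp
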